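-- pv_equiv track=rewrite | github.com/aswathi603/TensorTonic-Solutions | lag-features/lag-features.py | lag_features
-- ===== SOURCE A (Python) =====
-- def lag_features(series, lags):
--     """
--     Create a lag feature matrix from the time series.
--     """
--     # Write code here
--     result = []
--     max_lag = max(lags)
--
--     # Start from the first index where all lag values are available
--     for t in range(max_lag, len(series)):
--         row = []
--         for lag in lags:
--             row.append(series[t - lag])
--         result.append(row)
--
--     return result
-- ===== SOURCE B (Python) =====
-- def lag_features(series, lags):
--     """
--     Create a lag feature matrix from the time series.
--     """
--     max_lag = max(lags)
--     n = len(series)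
--     if max_lag >= n:
--         return []
--     columns = [series[max_lag - lag : n - lag] for lag in lags]
--     return [list(row) for row in zip(*columns)]
-- ===== Notes on version B (the rewrite author's own statement) =====
-- stated objective: alternative
-- what changed: B builds one column per lag as a slice series[max_lag-lag : n-lag] (after an early return [] when max_lag >= len(series)) and transposes the columns with zip(*columns), replacing A's per-time-step nested indexing loop.
import Mathlib
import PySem

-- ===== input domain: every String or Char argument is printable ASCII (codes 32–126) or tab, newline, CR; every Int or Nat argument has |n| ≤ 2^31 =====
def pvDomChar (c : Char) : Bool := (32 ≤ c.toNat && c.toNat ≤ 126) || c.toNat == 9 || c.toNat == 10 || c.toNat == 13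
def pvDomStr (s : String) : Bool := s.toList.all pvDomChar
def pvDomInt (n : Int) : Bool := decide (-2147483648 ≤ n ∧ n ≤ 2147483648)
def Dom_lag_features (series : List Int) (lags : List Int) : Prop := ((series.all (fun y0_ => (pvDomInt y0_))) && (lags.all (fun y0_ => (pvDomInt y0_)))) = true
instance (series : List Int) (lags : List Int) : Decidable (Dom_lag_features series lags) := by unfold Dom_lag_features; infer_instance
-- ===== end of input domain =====

-- B replaces A's per-time-step double loop by per-lag column slices plus a zip-transpose
-- (with an early return when the series is too short): an alternative decomposition, same cost.

-- ===== PORT A =====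
-- literal port of A: max(lags) (raises on [] → excluded by Pre_), then the nested append loop;
-- series[t - lag] is pyGetD (in range on every executed iteration inside Pre_).
def lag_features (series : List Int) (lags : List Int) : List (List Int) :=
  let max_lag : Int := (PySem.List.max? lags (fun l => l)).getD 0
  (PySem.List.pyRange max_lag (PySem.List.len series)).foldl
    (fun result t =>
      result ++ [lags.foldl (fun row lag => row ++ [PySem.List.pyGetD series (t - lag) 0]) []])
    []

-- ===== PORT B =====
-- hand port of '[list(row) for row in zip(*columns)]': exact Python zip semantics —
-- stop at the first exhausted column; zip() of no iterables yields nothing.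
def pvZipStar (cols : List (List Int)) : List (List Int) :=
  if cols.isEmpty || cols.any List.isEmpty then []
  else cols.map (fun c => c.headD 0) :: pvZipStar (cols.map List.tail)
termination_by (cols.headD []).length
decreasing_by
  rename_i h
  match cols with
  | [] => simp at h
  | c :: cs =>
    simp only [List.isEmpty_cons, List.any_cons, List.headD_cons,
      Bool.or_eq_true, not_or, List.isEmpty_iff] at h ⊢
    cases c with
    | nil => exact absurd rfl h.2.1
    | cons x xs => simp

-- literal port of Source B: max(lags), early [] when max_lag >= len(series),
-- per-lag slice columns, then the zip-transpose.
def lag_features_alt (series : List Int) (lags : List Int) : List (List Int) :=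
  let max_lag : Int := (PySem.List.max? lags (fun l => l)).getD 0
  let n : Int := PySem.List.len series
  if n ≤ max_lag then []
  else
    let columns := lags.map (fun lag => PySem.List.slice series (some (max_lag - lag)) (some (n - lag)))
    pvZipStar columns

-- ===== PRECONDITION & SPEC =====
-- Pre_ excludes exactly the inputs where A raises: empty lags (ValueError from max([])), and
-- any negative lag while max(lags) < len(series) (the loop then runs and hits an IndexError).
def Pre_lag_features (series : List Int) (lags : List Int) : Prop :=
  lags ≠ [] ∧ ((∀ l ∈ lags, 0 ≤ l) ∨ PySem.List.len series ≤ (PySem.List.max? lags (fun l => l)).getD 0)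
instance (series : List Int) (lags : List Int) : Decidable (Pre_lag_features series lags) := by
  unfold Pre_lag_features; infer_instance

def pvWitness_lag_features : List Int × List Int := ([10, 20, 30, 40, 50], [1, 2])

def Spec_lag_features (series : List Int) (lags : List Int) (out : List (List Int)) : Prop := out = lag_features_alt series lags
instance (series : List Int) (lags : List Int) (out : List (List Int)) : Decidable (Spec_lag_features series lags out) := by unfold Spec_lag_features; infer_instance

-- ===== CLAIM (what is proved, stated in full; the proofs are below) =====
def Claim_equal_lag_features : Prop := ∀ (series : List Int) (lags : List Int), Dom_lag_features series lags → Pre_lag_features series lags → Spec_lag_features series lags (lag_features series lags)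

-- ===== LEMMAS AND PROOFS =====

theorem pvGetD_tail (c : List Int) (i : Nat) : c.tail.getD i 0 = c.getD (i+1) 0 := by
  cases c <;> simp [List.getD]

-- zip(*cols) on a nonempty family of equal-length columns is the index transpose.
theorem pvZipStar_uniform (w : Nat) :
    ∀ (cols : List (List Int)), cols ≠ [] → (∀ c ∈ cols, c.length = w) →
      pvZipStar cols = (List.range w).map (fun i => cols.map (fun c => c.getD i 0)) := by
  induction w with
  | zero =>
    intro cols hne hw
    match cols with
    | c :: cs =>
      rw [pvZipStar]
      simp [List.length_eq_zero_iff.mp (hw c (by simp))]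
  | succ w ih =>
    intro cols hne hw
    rw [pvZipStar]
    have hne' : ¬ (cols.isEmpty || cols.any List.isEmpty) = true := by
      simp only [Bool.or_eq_true, List.any_eq_true, List.isEmpty_iff, not_or, not_exists]
      exact ⟨hne, fun c => not_and.mpr (fun hc hce => by
        have := hw c hc; simp [hce] at this)⟩
    rw [if_neg hne']
    rw [ih (cols.map List.tail) (by simpa using hne)
        (fun c hc => by
          obtain ⟨c', hc', rfl⟩ := List.mem_map.mp hc
          have := hw c' hc'; simp [List.length_tail, this])]
    rw [List.range_succ_eq_map]
    simp only [List.map_cons, List.map_map]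
    congr 1
    · exact List.map_congr_left (fun c _ => by cases c <;> simp [List.getD])
    · exact List.map_congr_left (fun i _ => List.map_congr_left (fun c _ => pvGetD_tail c i))

-- ===== VERDICT (by name: the statement is the Claim_ definition above) =====
theorem lag_features_spec : Claim_equal_lag_features := by
  intro series lags _ hpre
  obtain ⟨hne, hp⟩ := hpre
  obtain ⟨M, hM⟩ : ∃ M, PySem.List.max? lags (fun l => l) = some M := by
    cases h : PySem.List.max? lags (fun l => l) with
    | none => exact absurd ((PySem.List.max?_eq_none_iff lags _).mp h) hne
    | some M => exact ⟨M, rfl⟩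
  unfold Spec_lag_features lag_features lag_features_alt
  simp only [hM, Option.getD_some, PySem.List.len_eq]
  by_cases hc : (series.length : Int) ≤ M
  · rw [if_pos hc, PySem.List.pyRange_one_eq_nil hc]
    rfl
  · rw [not_le] at hc
    rw [if_neg (not_le.mpr hc)]
    have hmax : ∀ l ∈ lags, l ≤ M := by
      intro l hl
      exact PySem.List.max?_isMax hM l hl
    have hnn : ∀ l ∈ lags, 0 ≤ l := by
      rcases hp with h | h
      · exact h
      · exfalso; rw [PySem.List.len_eq, hM] at h; simp at h; omega
    have h0M : 0 ≤ M := by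
      match lags, hne with
      | l :: ls, _ => exact le_trans (hnn l (by simp)) (hmax l (by simp))
    set n : Nat := series.length with hn
    set w : Nat := ((n : Int) - M).toNat with hw
    -- A side: nested append-folds are maps over the range
    rw [show (fun (result : List (List Int)) (t : Int) =>
          result ++ [lags.foldl (fun row lag => row ++ [PySem.List.pyGetD series (t - lag) 0]) []])
        = (fun result t => result ++ [lags.map (fun lag => PySem.List.pyGetD series (t - lag) 0)])
      from funext fun result => funext fun t => by
        rw [PySem.List.foldl_append_singleton_eq_map]; rfl]
    rw [PySem.List.foldl_append_singleton_eq_map, List.nil_append, PySem.List.pyRange_one,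
      List.map_map]
    -- B side: uniform columns, then transpose
    have hcolw : ∀ c ∈ lags.map (fun lag =>
        PySem.List.slice series (some (M - lag)) (some ((n : Int) - lag))), c.length = w := by
      intro c hcmem
      obtain ⟨lag, hlag, rfl⟩ := List.mem_map.mp hcmem
      have h1 : 0 ≤ lag := hnn lag hlag
      have h2 : lag ≤ M := hmax lag hlag
      rw [PySem.List.slice_toNat series (by omega) (by omega)]
      simp only [List.length_take, List.length_drop]
      omega
    rw [pvZipStar_uniform w _ (by simp [hne]) hcolw]
    apply List.map_congr_left
    intro i hi
    rw [List.mem_range] at hi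
    rw [List.map_map]
    apply List.map_congr_left
    intro lag hlag
    have h1 : 0 ≤ lag := hnn lag hlag
    have h2 : lag ≤ M := hmax lag hlag
    simp only [Function.comp]
    rw [PySem.List.slice_toNat series (by omega) (by omega)]
    rw [PySem.List.pyGetD_eq_getElem series 0 (by omega) (by omega)]
    rw [List.getD_eq_getElem?_getD, List.getElem?_take, if_pos (by omega), List.getElem?_drop]
    rw [List.getElem?_eq_getElem (by omega)]
    simp only [Option.getD_some]
    congr 1
    omega
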